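-- pv_equiv track=rewrite | github.com/Gausslab-SeoulOffice/problems | yunjae/pathfinding_game.py | solution
-- ===== SOURCE A (Python) =====
-- def divide_nodes(nodes, y):
--     for i, node in enumerate(nodes):
--         if y == node[2]:
--             return nodes[:i], nodes[i+1:]
--
-- def solution(nodeinfo):
--     # 재귀함수 정의 (트리만들기 + 순회를 동시에)
--     def make_tree(nodes):
--
--         # 재귀 종료 조건
--         if not nodes:
--             return
--
--         n, x, y = max(nodes, key=lambda x:x[2]) # 먼저 루트노드를 찾자. y좌표가 가장 큰 노드가 루트노드다
--
--         x_sorted_nodes = sorted(nodes, key=lambda x:x[1])   # 노드를 x좌표에 대해 정렬하여, 좌표평면에 뿌려준다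
--                                                             # 같은 높이(y좌표)상에서 x좌표의 값에 따라 노드의 위치가 결정되기 때문
--
--         preord_list.append(n)  # 전위순회
--         l_nodes, r_nodes = divide_nodes(x_sorted_nodes, y) # 루트를 기준으로 노드들 분할
--         make_tree(l_nodes)
--         make_tree(r_nodes)
--         postord_list.append(n) # 후위순회
--
--     nodes = [(i+1, node[0], node[1]) for i, node in enumerate(nodeinfo)] # (node에 담길 값, x좌표, y좌표)
--     preord_list = []
--     postord_list = []
--
--     # 재귀 실행
--     make_tree(nodes)
--
--     answer = [preord_list, postord_list]
--
--     return answer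
-- ===== SOURCE B (Python) =====
-- def solution(nodeinfo):
--     # Sort by x once; each recursive call scans its segment for the max-y root
--     # and recurses on the two slices, returning the traversals functionally.
--     pts = sorted(((i + 1, r[0], r[1]) for i, r in enumerate(nodeinfo)),
--                  key=lambda p: p[1])
--
--     def walk(seg):
--         if not seg:
--             return [], []
--         best = 0
--         for j in range(1, len(seg)):
--             if seg[j][2] > seg[best][2]:
--                 best = j
--         n = seg[best][0]
--         lp, lq = walk(seg[:best])
--         rp, rq = walk(seg[best + 1:])
--         return [n] + lp + rp, lq + rq + [n]
--
--     pre, post = walk(pts)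
--     return [pre, post]
-- ===== Notes on version B (the rewrite author's own statement) =====
-- stated objective: alternative
-- what changed: B sorts the nodes by x once up front and recurses on slices of that sorted list with a single max-y scan per call, returning the two traversals functionally, instead of A's re-sorting and re-scanning of every sublist at every recursion level with shared mutable accumulator lists; it trades A's repeated sorted() calls for one sort plus an explicit argmax scan.
-- intended difference: On inputs where several rows share the maximal y and one of them has a strictly smaller x than the first such row in list order, A labels the root with the first max-y row in list order while splitting the plane at the first max-y node in x-order (a different node), so A's two traversals carry the wrong root label; B consistently uses the node it splits at, which is the intended root of the constructed BST. — e.g. on solution([[2, 5], [1, 5], [3, 5]]): A returns [[1, 1, 3], [3, 1, 1]], B returns [[2, 1, 3], [3, 1, 2]]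
import Mathlib
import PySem

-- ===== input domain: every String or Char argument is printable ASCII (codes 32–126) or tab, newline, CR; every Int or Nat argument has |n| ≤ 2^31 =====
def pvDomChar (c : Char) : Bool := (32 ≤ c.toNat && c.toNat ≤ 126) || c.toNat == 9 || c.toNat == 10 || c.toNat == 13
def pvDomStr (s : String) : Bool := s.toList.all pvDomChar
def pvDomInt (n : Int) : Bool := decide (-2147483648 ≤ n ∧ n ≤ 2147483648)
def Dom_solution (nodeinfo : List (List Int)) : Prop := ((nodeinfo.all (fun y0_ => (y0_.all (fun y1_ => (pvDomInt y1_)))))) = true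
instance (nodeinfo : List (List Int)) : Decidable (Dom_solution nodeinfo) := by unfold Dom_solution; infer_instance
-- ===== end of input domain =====

-- B sorts the nodes by x once up front and recurses on slices of that sorted list
-- (one max-y scan per call, traversals returned functionally) instead of A's
-- re-sorting of every sublist at each recursion level with shared accumulators.

-- ===== PORT A =====

-- divide_nodes: scan enumerate(nodes) for the first node with matching y;
-- nodes[:i]/nodes[i+1:] are take/drop, exact since i ≥ 0.

def divideGoA (full : List (Int × Int × Int)) (y : Int) :
    List (Int × Int × Int) → Nat → Option (List (Int × Int × Int) × List (Int × Int × Int))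
  | [], _ => none
  | nd :: rest, i =>
      if y = nd.2.2 then some (full.take i, full.drop (i + 1))
      else divideGoA full y rest (i + 1)


def divideNodesA (nodes : List (Int × Int × Int)) (y : Int) :
    Option (List (Int × Int × Int) × List (Int × Int × Int)) :=
  divideGoA nodes y nodes 0


-- make_tree, with fuel for termination (fuel = initial node count suffices: each
-- recursive call gets a strictly shorter list).  The closure-mutated preord/postord
-- lists become the threaded state st.  The `none` branches are Python crash points
-- (max on [] is guarded by the emptiness test; divide_nodes returning None is
-- unreachable since the maximal y occurs in the sorted list).

def makeTreeA : Nat → List (Int × Int × Int) → List Int × List Int → List Int × List Int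
  | 0, _, st => st
  | fuel + 1, nodes, st =>
    if nodes = [] then st
    else
      match PySem.List.max? nodes (fun t => t.2.2) with
      | none => st
      | some nd =>
        let xs := PySem.List.sorted nodes (fun t => t.2.1)
        let st1 := (st.1 ++ [nd.1], st.2)
        match divideNodesA xs nd.2.2 with
        | none => st1
        | some (l, r) =>
          let st2 := makeTreeA fuel l st1
          let st3 := makeTreeA fuel r st2
          (st3.1, st3.2 ++ [nd.1])


-- node[0]/node[1] via pyGetD: exact under Pre_ (every row has length ≥ 2).
def solution (nodeinfo : List (List Int)) : List (List Int) :=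
  let nodes := (PySem.List.enumerate nodeinfo).map
    (fun p => (p.1 + 1, PySem.List.pyGetD p.2 0 0, PySem.List.pyGetD p.2 1 0))
  let st := makeTreeA nodes.length nodes ([], [])
  [st.1, st.2]

-- ===== PORT B =====

-- seg[j][2] / seg[best][2]: indices are always in range, the getD default is never read.

def yAtB (seg : List (Int × Int × Int)) (i : Nat) : Int := (seg.getD i (0, 0, 0)).2.2


-- best = 0; for j in range(1, len(seg)): if seg[j][2] > seg[best][2]: best = j
-- (every j in range(1, len) is ≥ 1, so j.toNat is exact)

def bestB (seg : List (Int × Int × Int)) : Nat :=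
  (PySem.List.pyRange 1 (seg.length : Int)).foldl
    (fun best j => if yAtB seg j.toNat > yAtB seg best then j.toNat else best) 0


-- walk, with fuel as the totality guard (fuel = number of nodes suffices, as for A).
def walkB : Nat → List (Int × Int × Int) → List Int × List Int
  | 0, _ => ([], [])
  | fuel + 1, seg =>
    if seg = [] then ([], [])
    else
      let best := bestB seg
      let n := (seg.getD best (0, 0, 0)).1
      let L := walkB fuel (seg.take best)
      let R := walkB fuel (seg.drop (best + 1))
      (n :: (L.1 ++ R.1), L.2 ++ R.2 ++ [n])

def solution_alt (nodeinfo : List (List Int)) : List (List Int) :=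
  let pts := PySem.List.sorted
    ((PySem.List.enumerate nodeinfo).map
      (fun p => (p.1 + 1, PySem.List.pyGetD p.2 0 0, PySem.List.pyGetD p.2 1 0)))
    (fun t => t.2.1)
  let st := walkB pts.length pts
  [st.1, st.2]

-- ===== PRECONDITION & SPEC =====
-- Pre_ excludes exactly the rows with fewer than 2 entries, on which A raises IndexError.
def Pre_solution (nodeinfo : List (List Int)) : Prop :=
  ∀ r ∈ nodeinfo, 2 ≤ r.length
instance (nodeinfo : List (List Int)) : Decidable (Pre_solution nodeinfo) := by
  unfold Pre_solution; infer_instance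

def pvWitness_solution : List (List Int) := [[5, 3], [11, 5], [13, 3]]

-- row accessors used by D_ (x- and y-coordinate of row i)
def xRow (nodeinfo : List (List Int)) (i : Nat) : Int :=
  PySem.List.pyGetD (nodeinfo.getD i []) 0 0
def yRow (nodeinfo : List (List Int)) (i : Nat) : Int :=
  PySem.List.pyGetD (nodeinfo.getD i []) 1 0

-- On inputs where several rows share the maximal y-coordinate and some such row has a
-- strictly smaller x than the first of them, A labels the root with the first max-y row
-- in list order but splits the plane at the first max-y node in x-order (two different
-- nodes), while B consistently uses the node it splits at; B's choice is the intended
-- one since a BST root must be the node the subtrees are divided around.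
def D_solution (nodeinfo : List (List Int)) : Prop :=
  ∃ i, i < nodeinfo.length ∧
    (∀ k, k < nodeinfo.length → yRow nodeinfo k ≤ yRow nodeinfo i) ∧
    (∀ k, k < i → yRow nodeinfo k < yRow nodeinfo i) ∧
    ∃ j, j < nodeinfo.length ∧ yRow nodeinfo j = yRow nodeinfo i ∧
      xRow nodeinfo j < xRow nodeinfo i
instance (nodeinfo : List (List Int)) : Decidable (D_solution nodeinfo) := by
  unfold D_solution; infer_instance

def Spec_solution (nodeinfo : List (List Int)) (out : List (List Int)) : Prop := ¬ D_solution nodeinfo → out = solution_alt nodeinfo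
instance (nodeinfo : List (List Int)) (out : List (List Int)) : Decidable (Spec_solution nodeinfo out) := by unfold Spec_solution; infer_instance

def pvDiffWitness_solution : List (List Int) := [[2, 5], [1, 5], [3, 5]]
def pvDiffWitnessOut_solution : (List (List Int)) × (List (List Int)) :=
  ([[1, 1, 3], [3, 1, 1]], [[2, 1, 3], [3, 1, 2]])

-- ===== CLAIM (what is proved, stated in full; the proofs are below) =====
def Claim_unchanged_solution : Prop := ∀ (nodeinfo : List (List Int)), Dom_solution nodeinfo → Pre_solution nodeinfo → Spec_solution nodeinfo (solution nodeinfo)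
def Claim_changed_solution : Prop := Dom_solution (pvDiffWitness_solution) ∧ Pre_solution (pvDiffWitness_solution) ∧ D_solution (pvDiffWitness_solution) ∧ solution (pvDiffWitness_solution) = pvDiffWitnessOut_solution.1 ∧ solution_alt (pvDiffWitness_solution) = pvDiffWitnessOut_solution.2 ∧ pvDiffWitnessOut_solution.1 ≠ pvDiffWitnessOut_solution.2
def Claim_exact_solution : Prop := ∀ (nodeinfo : List (List Int)), Dom_solution nodeinfo → Pre_solution nodeinfo → D_solution nodeinfo → solution nodeinfo ≠ solution_alt nodeinfo

-- ===== LEMMAS AND PROOFS =====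


theorem maxFold_first {α : Type} (key : α → Int) :
    ∀ (l : List α) (m0 m : α),
    l.foldl (fun acc x => match acc with
      | none => some x
      | some mm => if key mm < key x then some x else some mm) (some m0) = some m →
    (m = m0 ∧ ∀ z ∈ l, key z ≤ key m0) ∨
    (key m0 < key m ∧ ∃ pre post, l = pre ++ m :: post ∧
      (∀ z ∈ pre, key z < key m) ∧ (∀ z ∈ post, key z ≤ key m)) := by
  intro l
  induction l with
  | nil => intro m0 m h; left; simp at h; simp [h]
  | cons z l ih =>
    intro m0 m h
    simp only [List.foldl_cons] at h
    by_cases hz : key m0 < key z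
    · rw [if_pos hz] at h
      rcases ih z m h with ⟨he, hall⟩ | ⟨hlt, pre, post, hl, hpre, hpost⟩
      · right
        subst he
        exact ⟨hz, [], l, rfl, by simp, hall⟩
      · right
        refine ⟨lt_trans hz hlt, z :: pre, post, by simp [hl], ?_, hpost⟩
        intro w hw
        rcases List.mem_cons.mp hw with hw | hw
        · subst hw; exact hlt
        · exact hpre w hw
    · rw [if_neg hz] at h
      rcases ih m0 m h with ⟨he, hall⟩ | ⟨hlt, pre, post, hl, hpre, hpost⟩
      · left
        refine ⟨he, ?_⟩
        intro w hw
        rcases List.mem_cons.mp hw with hw | hw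
        · subst hw; omega
        · exact hall w hw
      · right
        refine ⟨hlt, z :: pre, post, by simp [hl], ?_, hpost⟩
        intro w hw
        rcases List.mem_cons.mp hw with hw | hw
        · subst hw; omega
        · exact hpre w hw


theorem max?_first {α : Type} (key : α → Int) (xs : List α) (m : α)
    (h : PySem.List.max? xs key = some m) :
    ∃ pre post, xs = pre ++ m :: post ∧ (∀ z ∈ pre, key z < key m) := by
  cases xs with
  | nil => simp [PySem.List.max?] at h
  | cons a l =>
    have h' : l.foldl (fun acc x => match acc with
      | none => some x
      | some mm => if key mm < key x then some x else some mm) (some a) = some m := by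
      simpa [PySem.List.max?] using h
    rcases maxFold_first key l a m h' with ⟨he, _⟩ | ⟨hlt, pre, post, hl, hpre, _⟩
    · exact ⟨[], l, by simp [he], by simp⟩
    · refine ⟨a :: pre, post, by simp [hl], ?_⟩
      intro w hw
      rcases List.mem_cons.mp hw with hw | hw
      · subst hw; exact hlt
      · exact hpre w hw


def lexlt (a b : Int × Int × Int) : Prop :=
  a.2.1 < b.2.1 ∨ (a.2.1 = b.2.1 ∧ a.1 < b.1)


theorem insertBy_pairwise_lex (x : Int × Int × Int) :
    ∀ (ys : List (Int × Int × Int)),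
    ys.Pairwise lexlt → (∀ y ∈ ys, y.1 < x.1) →
    (PySem.List.insertBy (fun a b => decide (a.2.1 < b.2.1)) x ys).Pairwise lexlt := by
  intro ys
  induction ys with
  | nil => intro _ _; simp [PySem.List.insertBy, lexlt]
  | cons y ys ih =>
    intro hp hlab
    by_cases hxy : x.2.1 < y.2.1
    · simp only [PySem.List.insertBy, decide_eq_true_eq, if_pos hxy]
      refine List.Pairwise.cons ?_ hp
      intro z hz
      rcases List.mem_cons.mp hz with hz | hz
      · subst hz; exact Or.inl hxy
      · have : lexlt y z := (List.pairwise_cons.mp hp).1 z hz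
        rcases this with h | ⟨h, _⟩
        · exact Or.inl (lt_trans hxy h)
        · exact Or.inl (by omega)
    · simp only [PySem.List.insertBy, decide_eq_true_eq, if_neg hxy]
      refine List.Pairwise.cons ?_ (ih (List.pairwise_cons.mp hp).2
        (fun z hz => hlab z (List.mem_cons_of_mem _ hz)))
      intro z hz
      have hz' : z = x ∨ z ∈ ys := by
        have := (PySem.List.mem_insertBy _ _ _ _).mp hz
        tauto
      rcases hz' with hz' | hz'
      · subst hz'
        rcases lt_or_eq_of_le (le_of_not_gt hxy) with h | h
        · exact Or.inl h
        · exact Or.inr ⟨h.symm.symm, hlab y (by simp)⟩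
      · exact (List.pairwise_cons.mp hp).1 z hz'


theorem foldl_insertBy_lex :
    ∀ (l acc : List (Int × Int × Int)),
    acc.Pairwise lexlt →
    l.Pairwise (fun a b => a.1 < b.1) →
    (∀ a ∈ acc, ∀ b ∈ l, a.1 < b.1) →
    (l.foldl (fun acc x => PySem.List.insertBy (fun a b => decide (a.2.1 < b.2.1)) x acc)
      acc).Pairwise lexlt := by
  intro l
  induction l with
  | nil => intro acc h _ _; exact h
  | cons x l ih =>
    intro acc hacc hl hcross
    simp only [List.foldl_cons]
    apply ih
    · exact insertBy_pairwise_lex x acc hacc (fun y hy => hcross y hy x (by simp))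
    · exact (List.pairwise_cons.mp hl).2
    · intro a ha b hb
      rcases (PySem.List.mem_insertBy _ _ _ _).mp ha with ha | ha
      · subst ha; exact (List.pairwise_cons.mp hl).1 b hb
      · exact hcross a ha b (List.mem_cons_of_mem _ hb)


theorem sorted_pairwise_lex (l : List (Int × Int × Int))
    (hl : l.Pairwise (fun a b => a.1 < b.1)) :
    (PySem.List.sorted l (fun t => t.2.1)).Pairwise lexlt := by
  rw [PySem.List.sorted_eq_foldl_insertBy]
  exact foldl_insertBy_lex l [] (by simp) hl (by simp)


theorem bestB_aux (seg : List (Int × Int × Int)) :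
    ∀ m : Nat, 0 < m → m ≤ seg.length →
    ((PySem.List.pyRange 1 (m : Int)).foldl
        (fun best j => if yAtB seg j.toNat > yAtB seg best then j.toNat else best) 0 < m)
    ∧ (∀ k < m, yAtB seg k ≤ yAtB seg
        ((PySem.List.pyRange 1 (m : Int)).foldl
          (fun best j => if yAtB seg j.toNat > yAtB seg best then j.toNat else best) 0))
    ∧ (∀ k < (PySem.List.pyRange 1 (m : Int)).foldl
          (fun best j => if yAtB seg j.toNat > yAtB seg best then j.toNat else best) 0,
        yAtB seg k < yAtB seg
        ((PySem.List.pyRange 1 (m : Int)).foldl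
          (fun best j => if yAtB seg j.toNat > yAtB seg best then j.toNat else best) 0)) := by
  intro m
  induction m with
  | zero => omega
  | succ m ih =>
    intro _ hm
    by_cases hm0 : m = 0
    · subst hm0
      rw [PySem.List.pyRange_one_eq_nil (by norm_num)]
      refine ⟨by simp, ?_, by simp⟩
      intro k hk; interval_cases k; simp
    · have h1 : (1:Int) ≤ (m:Int) := by omega
      have hr : PySem.List.pyRange 1 ((m:Nat) + 1 : Int) = PySem.List.pyRange 1 (m:Int) ++ [(m:Int)] :=
        PySem.List.pyRange_one_succ_right h1
      have hcast : ((m+1 : Nat) : Int) = (m:Int) + 1 := by push_cast; ring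
      rw [hcast, hr, List.foldl_append]
      obtain ⟨hblt, hbmax, hbfirst⟩ := ih (by omega) (by omega)
      set b := (PySem.List.pyRange 1 (m:Int)).foldl
          (fun best j => if yAtB seg j.toNat > yAtB seg best then j.toNat else best) 0 with hbdef
      simp only [List.foldl_cons, List.foldl_nil, Int.toNat_natCast]
      by_cases h : yAtB seg m > yAtB seg b
      · rw [if_pos h]
        refine ⟨by omega, ?_, ?_⟩
        · intro k hk
          rcases Nat.lt_succ_iff_lt_or_eq.mp hk with h' | h'
          · exact le_trans (hbmax k h') (le_of_lt h)
          · subst h'; exact le_rfl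
        · intro k hk
          exact lt_of_le_of_lt (hbmax k hk) h
      · rw [if_neg h]
        refine ⟨by omega, ?_, hbfirst⟩
        intro k hk
        rcases Nat.lt_succ_iff_lt_or_eq.mp hk with h' | h'
        · exact hbmax k h'
        · subst h'; omega


theorem bestB_lt (seg : List (Int × Int × Int)) (h : seg ≠ []) : bestB seg < seg.length :=
  (bestB_aux seg seg.length (List.length_pos_iff.mpr h) le_rfl).1


theorem bestB_isMax (seg : List (Int × Int × Int)) (h : seg ≠ []) :
    ∀ k < seg.length, yAtB seg k ≤ yAtB seg (bestB seg) :=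
  (bestB_aux seg seg.length (List.length_pos_iff.mpr h) le_rfl).2.1


theorem bestB_first (seg : List (Int × Int × Int)) (h : seg ≠ []) :
    ∀ k < bestB seg, yAtB seg k < yAtB seg (bestB seg) :=
  (bestB_aux seg seg.length (List.length_pos_iff.mpr h) le_rfl).2.2


theorem divideGo_spec (xs : List (Int × Int × Int)) (b : Nat) (hb : b < xs.length)
    (hfirst : ∀ k, (hk : k < xs.length) → k < b → xs[k].2.2 ≠ xs[b].2.2) :
    ∀ (c j : Nat), j + c = b → j ≤ b →
      divideGoA xs xs[b].2.2 (xs.drop j) j = some (xs.take b, xs.drop (b + 1)) := by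
  intro c
  induction c with
  | zero =>
    intro j hj _
    have hjb : j = b := by omega
    subst hjb
    rw [List.drop_eq_getElem_cons hb]
    simp [divideGoA]
  | succ c ih =>
    intro j hj hjb
    have hjlt : j < xs.length := by omega
    rw [List.drop_eq_getElem_cons hjlt]
    have hne : xs[b].2.2 ≠ xs[j].2.2 := fun h => hfirst j hjlt (by omega) h.symm
    simp only [divideGoA, if_neg hne]
    exact ih (j + 1) (by omega) (by omega)


theorem firstmax_facts (seg : List (Int × Int × Int)) (nd : Int × Int × Int)
    (pre post : List (Int × Int × Int)) (hdecomp : seg = pre ++ nd :: post) :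
    pre.length < seg.length ∧ seg[pre.length]'(by simp [hdecomp]) = nd ∧
    ∀ k, (hk : k < pre.length) → seg[k]'(by simp [hdecomp]; omega) = pre[k] := by
  subst hdecomp
  refine ⟨by simp, ?_, ?_⟩
  · simp
  · intro k hk
    exact List.getElem_append_left hk


theorem walkB_nil (fuel : Nat) : walkB fuel [] = ([], []) := by cases fuel <;> simp [walkB]

theorem walkB_cons (fuel : Nat) (seg : List (Int × Int × Int)) (h : seg ≠ []) :
    walkB (fuel + 1) seg = ((seg.getD (bestB seg) (0,0,0)).1 ::
        ((walkB fuel (seg.take (bestB seg))).1 ++ (walkB fuel (seg.drop (bestB seg + 1))).1),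
      (walkB fuel (seg.take (bestB seg))).2 ++ (walkB fuel (seg.drop (bestB seg + 1))).2 ++
        [(seg.getD (bestB seg) (0,0,0)).1]) := by
  simp [walkB, h]


theorem main_sorted : ∀ (fuel : Nat) (seg : List (Int × Int × Int)) (st : List Int × List Int),
    seg.length ≤ fuel → seg.Pairwise (fun a b => a.2.1 ≤ b.2.1) →
    makeTreeA fuel seg st = (st.1 ++ (walkB fuel seg).1, st.2 ++ (walkB fuel seg).2) := by
  intro fuel
  induction fuel with
  | zero =>
    intro seg st hlen _
    have hseg : seg = [] := List.length_eq_zero_iff.mp (by omega)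
    subst hseg
    simp [makeTreeA, walkB_nil]
  | succ fuel ih =>
    intro seg st hlen hsorted
    by_cases hseg : seg = []
    · subst hseg
      simp [makeTreeA, walkB_nil]
    · rcases hmx : PySem.List.max? seg (fun t => t.2.2) with _ | nd
      · exact absurd ((PySem.List.max?_eq_none_iff _ _).mp hmx) hseg
      obtain ⟨pre, post, hdecomp, hpre⟩ := max?_first _ seg nd hmx
      obtain ⟨hi0, hnd, hprek⟩ := firstmax_facts seg nd pre post hdecomp
      set i0 := pre.length with hi0def
      have hymax : ∀ k, (hk : k < seg.length) → seg[k].2.2 ≤ nd.2.2 := fun k hk =>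
        PySem.List.max?_isMax hmx _ (seg.getElem_mem hk)
      have hyfirst : ∀ k, (hk : k < seg.length) → k < i0 → seg[k].2.2 < nd.2.2 := by
        intro k hk hki
        rw [hprek k hki]
        exact hpre _ (pre.getElem_mem hki)
      -- sorted seg = seg
      have hsid : PySem.List.sorted seg (fun t => t.2.1) = seg :=
        PySem.List.sorted_eq_self_of_pairwise _ _ hsorted
      -- bestB seg = i0
      have hyb : ∀ k, (hk : k < seg.length) → yAtB seg k = seg[k].2.2 := by
        intro k hk
        unfold yAtB
        rw [List.getD_eq_getElem _ _ hk]
      have hbest : bestB seg = i0 := by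
        have hblt := bestB_lt seg hseg
        rcases Nat.lt_trichotomy (bestB seg) i0 with h | h | h
        · exfalso
          have h1 : seg[bestB seg].2.2 < nd.2.2 := hyfirst _ hblt h
          have h2 := bestB_isMax seg hseg i0 hi0
          rw [hyb _ hi0, hyb _ hblt, hnd] at h2
          omega
        · exact h
        · exfalso
          have h1 := bestB_first seg hseg i0 h
          rw [hyb _ hi0, hyb _ hblt, hnd] at h1
          have h2 := hymax _ hblt
          omega
      -- divide splits at i0
      have hdiv : divideNodesA seg nd.2.2 = some (seg.take i0, seg.drop (i0 + 1)) := by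
        have hfst : ∀ k, (hk : k < seg.length) → k < i0 → seg[k].2.2 ≠ (seg[i0]'hi0).2.2 := by
          intro k hk hki
          rw [hnd]
          exact ne_of_lt (hyfirst k hk hki)
        have := divideGo_spec seg i0 hi0 hfst i0 0 (by omega) (by omega)
        rw [hnd] at this
        simpa [divideNodesA] using this
      have hll : (seg.take i0).length ≤ fuel := by rw [List.length_take]; omega
      have hrl : (seg.drop (i0+1)).length ≤ fuel := by rw [List.length_drop]; omega
      have hsl : (seg.take i0).Pairwise (fun a b => a.2.1 ≤ b.2.1) :=
        List.Pairwise.sublist (List.take_sublist _ _) hsorted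
      have hsr : (seg.drop (i0+1)).Pairwise (fun a b => a.2.1 ≤ b.2.1) :=
        List.Pairwise.sublist (List.drop_sublist _ _) hsorted
      have hA : makeTreeA (fuel+1) seg st =
          (let st1 := (st.1 ++ [nd.1], st.2)
           let st2 := makeTreeA fuel (seg.take i0) st1
           let st3 := makeTreeA fuel (seg.drop (i0+1)) st2
           (st3.1, st3.2 ++ [nd.1])) := by
        simp only [makeTreeA, if_neg hseg, hmx, hsid, hdiv]
      have ihl := fun st => ih (seg.take i0) st hll hsl
      have ihr := fun st => ih (seg.drop (i0+1)) st hrl hsr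
      rw [hA]
      simp only [ihl, ihr]
      rw [walkB_cons fuel seg hseg, hbest]
      rw [List.getD_eq_getElem _ _ hi0, hnd]
      simp [List.append_assoc]

theorem yAtB_eq (seg : List (Int × Int × Int)) (k : Nat) (hk : k < seg.length) :
    yAtB seg k = (seg[k]'hk).2.2 := by
  unfold yAtB
  rw [List.getD_eq_getElem _ _ hk]

theorem root_y_eq (nodes : List (Int × Int × Int)) (hne : nodes ≠ [])
    (nd : Int × Int × Int) (hmx : PySem.List.max? nodes (fun t => t.2.2) = some nd)
    (hxne : PySem.List.sorted nodes (fun t => t.2.1) ≠ []) :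
    ((PySem.List.sorted nodes (fun t => t.2.1))[bestB (PySem.List.sorted nodes (fun t => t.2.1))]'(bestB_lt _ hxne)).2.2 = nd.2.2 := by
  set xs := PySem.List.sorted nodes (fun t => t.2.1) with hxs
  have hb := bestB_lt xs hxne
  have hymax : ∀ p, (hp : p < xs.length) → (xs[p]'hp).2.2 ≤ nd.2.2 := by
    intro p hp
    exact PySem.List.max?_isMax hmx _ ((PySem.List.mem_sorted _ _ _ _).mp (xs.getElem_mem hp))
  have hmem : nd ∈ xs := (PySem.List.mem_sorted _ _ _ _).mpr (PySem.List.max?_mem hmx)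
  obtain ⟨p, hp, hxp⟩ := List.mem_iff_getElem.mp hmem
  have h1 := bestB_isMax xs hxne p hp
  rw [yAtB_eq xs p hp, yAtB_eq xs _ hb, hxp] at h1
  exact le_antisymm (hymax _ hb) h1

theorem top_step (nodes : List (Int × Int × Int)) (st : List Int × List Int) (fuel : Nat)
    (hne : nodes ≠ []) (hf : nodes.length ≤ fuel + 1)
    (nd : Int × Int × Int) (hmx : PySem.List.max? nodes (fun t => t.2.2) = some nd) :
    makeTreeA (fuel + 1) nodes st =
      (st.1 ++ nd.1 ::
        ((walkB fuel ((PySem.List.sorted nodes (fun t => t.2.1)).take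
            (bestB (PySem.List.sorted nodes (fun t => t.2.1))))).1 ++
         (walkB fuel ((PySem.List.sorted nodes (fun t => t.2.1)).drop
            (bestB (PySem.List.sorted nodes (fun t => t.2.1)) + 1))).1),
       st.2 ++
        ((walkB fuel ((PySem.List.sorted nodes (fun t => t.2.1)).take
            (bestB (PySem.List.sorted nodes (fun t => t.2.1))))).2 ++
         (walkB fuel ((PySem.List.sorted nodes (fun t => t.2.1)).drop
            (bestB (PySem.List.sorted nodes (fun t => t.2.1)) + 1))).2 ++ [nd.1])) := by
  set xs := PySem.List.sorted nodes (fun t => t.2.1) with hxs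
  have hxlen : xs.length = nodes.length := PySem.List.length_sorted _ _ _
  have hxne : xs ≠ [] := by
    intro h
    apply hne
    apply List.length_eq_zero_iff.mp
    rw [← hxlen, h]
    rfl
  have hb := bestB_lt xs hxne
  have hyroot := root_y_eq nodes hne nd hmx hxne
  have hdiv : divideNodesA xs nd.2.2 = some (xs.take (bestB xs), xs.drop (bestB xs + 1)) := by
    have hfst : ∀ k, (hk : k < xs.length) → k < bestB xs →
        (xs[k]'hk).2.2 ≠ (xs[bestB xs]'hb).2.2 := by
      intro k hk hkb
      have := bestB_first xs hxne k hkb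
      rw [yAtB_eq xs k hk, yAtB_eq xs _ hb] at this
      exact ne_of_lt this
    have := divideGo_spec xs (bestB xs) hb hfst (bestB xs) 0 (by omega) (by omega)
    rw [hyroot] at this
    simpa [divideNodesA] using this
  have hll : (xs.take (bestB xs)).length ≤ fuel := by rw [List.length_take]; omega
  have hrl : (xs.drop (bestB xs + 1)).length ≤ fuel := by rw [List.length_drop]; omega
  have hsl : (xs.take (bestB xs)).Pairwise (fun a b => a.2.1 ≤ b.2.1) :=
    List.Pairwise.sublist (List.take_sublist _ _) (PySem.List.sorted_pairwise nodes _)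
  have hsr : (xs.drop (bestB xs + 1)).Pairwise (fun a b => a.2.1 ≤ b.2.1) :=
    List.Pairwise.sublist (List.drop_sublist _ _) (PySem.List.sorted_pairwise nodes _)
  have hA : makeTreeA (fuel+1) nodes st =
      (let st1 := (st.1 ++ [nd.1], st.2)
       let st2 := makeTreeA fuel (xs.take (bestB xs)) st1
       let st3 := makeTreeA fuel (xs.drop (bestB xs + 1)) st2
       (st3.1, st3.2 ++ [nd.1])) := by
    simp only [makeTreeA, if_neg hne, hmx, ← hxs, hdiv]
  rw [hA]
  simp only [main_sorted fuel _ _ hll hsl, main_sorted fuel _ _ hrl hsr]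
  simp [List.append_assoc]

-- proof-side name for the node list both ports build (definitionally equal to their term)
def nodesOf (nodeinfo : List (List Int)) : List (Int × Int × Int) :=
  (PySem.List.enumerate nodeinfo).map
    (fun p => (p.1 + 1, PySem.List.pyGetD p.2 0 0, PySem.List.pyGetD p.2 1 0))

theorem nodesOf_length (nodeinfo : List (List Int)) :
    (nodesOf nodeinfo).length = nodeinfo.length := by
  simp [nodesOf, PySem.List.length_enumerate]

theorem nodesOf_get (nodeinfo : List (List Int)) (i : Nat) (hi : i < (nodesOf nodeinfo).length) :
    (nodesOf nodeinfo)[i]'hi =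
      ((i : Int) + 1, xRow nodeinfo i, yRow nodeinfo i) := by
  have hi' : i < nodeinfo.length := by rw [← nodesOf_length nodeinfo]; exact hi
  unfold nodesOf
  rw [List.getElem_map, PySem.List.getElem_enumerate nodeinfo 0 i
    (by rw [PySem.List.length_enumerate]; exact hi')]
  unfold xRow yRow
  rw [List.getD_eq_getElem _ _ hi']
  simp

theorem nodesOf_pairwise_lab (nodeinfo : List (List Int)) :
    (nodesOf nodeinfo).Pairwise (fun a b => a.1 < b.1) := by
  unfold nodesOf
  rw [List.pairwise_map]
  have := PySem.List.pairwise_lt_enumerate nodeinfo 0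
  exact this.imp (by intro a b h; simpa using by omega)

theorem firstmax_nodes (nodeinfo : List (List Int)) (nd : Int × Int × Int)
    (hmx : PySem.List.max? (nodesOf nodeinfo) (fun t => t.2.2) = some nd) :
    ∃ i0, ∃ (hi0 : i0 < (nodesOf nodeinfo).length),
      (nodesOf nodeinfo)[i0]'hi0 = nd ∧
      (∀ k, (hk : k < (nodesOf nodeinfo).length) → ((nodesOf nodeinfo)[k]'hk).2.2 ≤ nd.2.2) ∧
      (∀ k, (hk : k < (nodesOf nodeinfo).length) → k < i0 →
        ((nodesOf nodeinfo)[k]'hk).2.2 < nd.2.2) := by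
  obtain ⟨pre, post, hdecomp, hpre⟩ := max?_first _ (nodesOf nodeinfo) nd hmx
  obtain ⟨hi0, hnd, hprek⟩ := firstmax_facts (nodesOf nodeinfo) nd pre post hdecomp
  refine ⟨pre.length, hi0, hnd, ?_, ?_⟩
  · intro k hk
    exact PySem.List.max?_isMax hmx _ ((nodesOf nodeinfo).getElem_mem hk)
  · intro k hk hki
    rw [hprek k hki]
    exact hpre _ (pre.getElem_mem hki)

theorem root_node (nodeinfo : List (List Int)) (nd : Int × Int × Int)
    (hmx : PySem.List.max? (nodesOf nodeinfo) (fun t => t.2.2) = some nd)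
    (hxne : PySem.List.sorted (nodesOf nodeinfo) (fun t => t.2.1) ≠ []) :
    (D_solution nodeinfo →
      ((PySem.List.sorted (nodesOf nodeinfo) (fun t => t.2.1))[bestB (PySem.List.sorted (nodesOf nodeinfo) (fun t => t.2.1))]'(bestB_lt _ hxne)).1 ≠ nd.1) ∧
    (¬ D_solution nodeinfo →
      (PySem.List.sorted (nodesOf nodeinfo) (fun t => t.2.1))[bestB (PySem.List.sorted (nodesOf nodeinfo) (fun t => t.2.1))]'(bestB_lt _ hxne) = nd) := by
  have hne : nodesOf nodeinfo ≠ [] := by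
    intro h; rw [h] at hmx; simp [PySem.List.max?] at hmx
  set xs := PySem.List.sorted (nodesOf nodeinfo) (fun t => t.2.1) with hxs
  set b := bestB xs with hbdef
  have hb : b < xs.length := bestB_lt _ hxne
  have hxlen : xs.length = (nodesOf nodeinfo).length := PySem.List.length_sorted _ _ _
  have hyroot : (xs[b]'hb).2.2 = nd.2.2 := root_y_eq _ hne nd hmx hxne
  obtain ⟨i0, hi0, hnd0, hymax, hyfirst⟩ := firstmax_nodes nodeinfo nd hmx
  have hlex : xs.Pairwise lexlt := sorted_pairwise_lex _ (nodesOf_pairwise_lab nodeinfo)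
  -- the B-root as an element of nodes
  have hmemb : xs[b]'hb ∈ nodesOf nodeinfo :=
    (PySem.List.mem_sorted _ _ _ _).mp (xs.getElem_mem hb)
  obtain ⟨jb, hjb, hjbe⟩ := List.mem_iff_getElem.mp hmemb
  -- position of nd inside xs
  have hmem : nd ∈ xs := (PySem.List.mem_sorted _ _ _ _).mpr (PySem.List.max?_mem hmx)
  obtain ⟨p, hp, hxp⟩ := List.mem_iff_getElem.mp hmem
  have hpb : b ≤ p := by
    by_contra hlt
    have := bestB_first xs hxne p (by omega)
    rw [yAtB_eq xs p hp, yAtB_eq xs b hb, hxp, hyroot] at this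
    omega
  -- labels/coords of nodes via the bridge
  have hlab := fun (k : Nat) (hk : k < (nodesOf nodeinfo).length) => nodesOf_get nodeinfo k hk
  have hndi : nd = ((i0 : Int) + 1, xRow nodeinfo i0, yRow nodeinfo i0) := by
    rw [← hnd0]; exact hlab i0 hi0
  have hyndi : nd.2.2 = yRow nodeinfo i0 := by rw [hndi]
  have hxndi : nd.2.1 = xRow nodeinfo i0 := by rw [hndi]
  have hlndi : nd.1 = (i0 : Int) + 1 := by rw [hndi]
  -- scalar facts about the B-root
  have hjby : yRow nodeinfo jb = nd.2.2 := by
    have h1 := hlab jb hjb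
    rw [hjbe] at h1
    rw [← hyroot, h1]
  have hjbx : xRow nodeinfo jb = (xs[b]'hb).2.1 := by
    have h1 := hlab jb hjb
    rw [hjbe] at h1
    rw [h1]
  have hjbl : (xs[b]'hb).1 = (jb : Int) + 1 := by
    have h1 := hlab jb hjb
    rw [hjbe] at h1
    rw [h1]
  have hymax' : ∀ k, k < nodeinfo.length → yRow nodeinfo k ≤ yRow nodeinfo i0 := by
    intro k hk
    have hk' : k < (nodesOf nodeinfo).length := by rw [nodesOf_length]; exact hk
    have := hymax k hk'
    rw [hlab k hk', hyndi] at this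
    simpa using this
  have hyfirst' : ∀ k, k < i0 → yRow nodeinfo k < yRow nodeinfo i0 := by
    intro k hk
    have hk' : k < (nodesOf nodeinfo).length := by omega
    have := hyfirst k hk' hk
    rw [hlab k hk', hyndi] at this
    simpa using this
  constructor
  · -- D holds: the labels differ
    rintro ⟨i, hi, himax, hifirst, j, hj, hyj, hxj⟩ heq
    have hi' : i < (nodesOf nodeinfo).length := by rw [nodesOf_length]; exact hi
    have hii0 : i = i0 := by
      rcases Nat.lt_trichotomy i i0 with h | h | h
      · exfalso
        have h1 := hyfirst' i h
        have h2 := himax i0 (by rw [← nodesOf_length nodeinfo]; exact hi0)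
        omega
      · exact h
      · exfalso
        have h1 := hifirst i0 h
        have h2 := hymax' i hi
        omega
    rw [hii0] at hyj hxj
    -- equal labels would force the B-root to be nd itself
    have hjbi : jb = i0 := by
      rw [hjbl, hlndi] at heq
      omega
    have hxbe : xs[b]'hb = nd := by
      subst hjbi
      rw [← hjbe]
      exact hnd0
    -- now D's j contradicts
    have hj' : j < (nodesOf nodeinfo).length := by rw [nodesOf_length]; exact hj
    have hmemj : (nodesOf nodeinfo)[j]'hj' ∈ xs :=
      (PySem.List.mem_sorted _ _ _ _).mpr ((nodesOf nodeinfo).getElem_mem hj')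
    obtain ⟨q, hq, hqe⟩ := List.mem_iff_getElem.mp hmemj
    have hyjv : ((nodesOf nodeinfo)[j]'hj').2.2 = nd.2.2 := by
      rw [hlab j hj']
      rw [hyndi]
      simpa using hyj
    have hxjv : ((nodesOf nodeinfo)[j]'hj').2.1 < nd.2.1 := by
      rw [hlab j hj']
      rw [hxndi]
      simpa using hxj
    rcases Nat.lt_trichotomy q b with h | h | h
    · have := bestB_first xs hxne q h
      rw [yAtB_eq xs q hq, yAtB_eq xs b hb, hqe, hyroot, hyjv] at this
      omega
    · subst h
      rw [hqe] at hxbe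
      rw [hxbe] at hxjv
      omega
    · have := List.pairwise_iff_getElem.mp hlex b q hb hq h
      rw [hqe, hxbe] at this
      rcases this with hlt | ⟨heq2, _⟩
      · omega
      · omega
  · -- ¬D: the roots coincide
    intro hnD
    rcases Nat.lt_or_ge b p with h | h
    · exfalso
      have hlx := List.pairwise_iff_getElem.mp hlex b p hb hp h
      rw [hxp] at hlx
      rcases hlx with hlt | ⟨heq2, hlabl⟩
      · -- strictly smaller x at same max y: D would hold
        apply hnD
        refine ⟨i0, by rw [← nodesOf_length nodeinfo]; exact hi0, hymax', hyfirst', jb,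
          by rw [← nodesOf_length nodeinfo]; exact hjb, ?_, ?_⟩
        · rw [hjby, hyndi]
        · rw [hjbx, ← hxndi]
          exact hlt
      · -- equal x, smaller label: jb < i0 contradicts first-argmax
        exfalso
        rw [hjbl, hlndi] at hlabl
        have hjbi0 : jb < i0 := by omega
        have h1 := hyfirst' jb hjbi0
        rw [hjby, hyndi] at h1
        omega
    · have hpb' : p = b := by omega
      subst hpb'
      exact hxp

theorem solution_forms (nodeinfo : List (List Int)) (hni : nodeinfo ≠ []) :
    ∃ nd f, PySem.List.max? (nodesOf nodeinfo) (fun t => t.2.2) = some nd ∧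
      ∃ hxne : PySem.List.sorted (nodesOf nodeinfo) (fun t => t.2.1) ≠ [],
      solution nodeinfo =
        [nd.1 ::
          ((walkB f ((PySem.List.sorted (nodesOf nodeinfo) (fun t => t.2.1)).take
              (bestB (PySem.List.sorted (nodesOf nodeinfo) (fun t => t.2.1))))).1 ++
           (walkB f ((PySem.List.sorted (nodesOf nodeinfo) (fun t => t.2.1)).drop
              (bestB (PySem.List.sorted (nodesOf nodeinfo) (fun t => t.2.1)) + 1))).1),
         (walkB f ((PySem.List.sorted (nodesOf nodeinfo) (fun t => t.2.1)).take
              (bestB (PySem.List.sorted (nodesOf nodeinfo) (fun t => t.2.1))))).2 ++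
           (walkB f ((PySem.List.sorted (nodesOf nodeinfo) (fun t => t.2.1)).drop
              (bestB (PySem.List.sorted (nodesOf nodeinfo) (fun t => t.2.1)) + 1))).2 ++ [nd.1]] ∧
      solution_alt nodeinfo =
        [((PySem.List.sorted (nodesOf nodeinfo) (fun t => t.2.1))[bestB (PySem.List.sorted (nodesOf nodeinfo) (fun t => t.2.1))]'(bestB_lt _ hxne)).1 ::
          ((walkB f ((PySem.List.sorted (nodesOf nodeinfo) (fun t => t.2.1)).take
              (bestB (PySem.List.sorted (nodesOf nodeinfo) (fun t => t.2.1))))).1 ++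
           (walkB f ((PySem.List.sorted (nodesOf nodeinfo) (fun t => t.2.1)).drop
              (bestB (PySem.List.sorted (nodesOf nodeinfo) (fun t => t.2.1)) + 1))).1),
         (walkB f ((PySem.List.sorted (nodesOf nodeinfo) (fun t => t.2.1)).take
              (bestB (PySem.List.sorted (nodesOf nodeinfo) (fun t => t.2.1))))).2 ++
           (walkB f ((PySem.List.sorted (nodesOf nodeinfo) (fun t => t.2.1)).drop
              (bestB (PySem.List.sorted (nodesOf nodeinfo) (fun t => t.2.1)) + 1))).2 ++
           [((PySem.List.sorted (nodesOf nodeinfo) (fun t => t.2.1))[bestB (PySem.List.sorted (nodesOf nodeinfo) (fun t => t.2.1))]'(bestB_lt _ hxne)).1]] := by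
  have hne : nodesOf nodeinfo ≠ [] := by
    intro h
    apply hni
    apply List.length_eq_zero_iff.mp
    rw [← nodesOf_length nodeinfo, h]
    rfl
  have hlpos : 0 < (nodesOf nodeinfo).length := List.length_pos_iff.mpr hne
  obtain ⟨f, hf⟩ : ∃ f, (nodesOf nodeinfo).length = f + 1 :=
    ⟨(nodesOf nodeinfo).length - 1, by omega⟩
  have hmxne : PySem.List.max? (nodesOf nodeinfo) (fun t => t.2.2) ≠ none := by
    intro h
    exact hne ((PySem.List.max?_eq_none_iff _ _).mp h)
  obtain ⟨nd, hmx⟩ := Option.ne_none_iff_exists'.mp hmxne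
  set xs := PySem.List.sorted (nodesOf nodeinfo) (fun t => t.2.1) with hxs
  have hxlen : xs.length = (nodesOf nodeinfo).length := PySem.List.length_sorted _ _ _
  have hxne : xs ≠ [] := by
    intro h
    rw [h] at hxlen
    simp at hxlen
    omega
  refine ⟨nd, f, hmx, hxne, ?_, ?_⟩
  · have hsol : solution nodeinfo =
        [(makeTreeA (nodesOf nodeinfo).length (nodesOf nodeinfo) ([], [])).1,
         (makeTreeA (nodesOf nodeinfo).length (nodesOf nodeinfo) ([], [])).2] := rfl
    rw [hsol, hf, top_step (nodesOf nodeinfo) ([], []) f hne (by omega) nd hmx]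
    simp [← hxs]
  · have halt : solution_alt nodeinfo = [(walkB xs.length xs).1, (walkB xs.length xs).2] := rfl
    rw [halt, hxlen, hf, walkB_cons f xs hxne,
      List.getD_eq_getElem _ _ (bestB_lt xs hxne)]

-- ===== VERDICT (by name: the statement is the Claim_ definition above) =====
theorem solution_spec : Claim_unchanged_solution := by
  intro nodeinfo _ _
  unfold Spec_solution
  intro hnD
  by_cases hni : nodeinfo = []
  · subst hni; rfl
  · obtain ⟨nd, f, hmx, hxne, hsol, halt⟩ := solution_forms nodeinfo hni
    rw [hsol, halt, (root_node nodeinfo nd hmx hxne).2 hnD]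

theorem solution_changed : Claim_changed_solution := by
  unfold Claim_changed_solution
  decide

theorem solution_tight : Claim_exact_solution := by
  intro nodeinfo _ _ hD heq
  have hni : nodeinfo ≠ [] := by
    rcases hD with ⟨i, hi, _⟩
    intro h
    rw [h] at hi
    simp at hi
  obtain ⟨nd, f, hmx, hxne, hsol, halt⟩ := solution_forms nodeinfo hni
  rw [hsol, halt] at heq
  have hhead := (List.cons.injEq _ _ _ _).mp heq
  have := (List.cons.injEq _ _ _ _).mp hhead.1
  exact (root_node nodeinfo nd hmx hxne).1 hD this.1.symm
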